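-- pv_equiv track=rewrite | github.com/GoldenTiger720/football-referee-system | YOLOv8-TensorRT-main/src/detector_utils.py | insert_for_even_distribution
-- ===== SOURCE A (Python) =====
-- def insert_for_even_distribution(processed_frames, available_frames):
--     if len(processed_frames)==0:
--         return available_frames[0]
--     if len(processed_frames)==1:
--         return available_frames[len(available_frames)-1]
--
--     # Sort frames to ensure they are in ascending order
--     processed_frames.sort()
--
--     # List to hold gaps and their starting index (gap size, start index)
--     gaps = []
--
--     # Calculate gaps and store them with their start index
--     for i in range(len(processed_frames) - 1):
--         current_gap = processed_frames[i+1] - processed_frames[i]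
--         # Store the gap size and the index before the gap starts
--         gaps.append((current_gap, i))
--
--     # Sort gaps by size in descending order
--     gaps.sort(reverse=True, key=lambda x: x[0])
--
--     # Try to fill gaps from the largest to the smallest
--     for gap_size, start_index in gaps:
--         # Calculate the target frame for the current gap
--         target_frame = (processed_frames[start_index+1] + processed_frames[start_index]) // 2
--
--         # Initialize best fit for the current gap
--         best_fit = None
--         for frame in available_frames:
--             if processed_frames[start_index] < frame < processed_frames[start_index+1]:
--                 if best_fit is None or abs(frame - target_frame) < abs(best_fit - target_frame):
--                     best_fit = frame
--
--         # If a suitable frame is found for this gap, insert it and return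
--         if best_fit is not None:
--             # Here you might want to actually insert the frame into processed_frames if needed
--             # processed_frames.insert(start_index + 1, best_fit)
--             return best_fit
--
--     # If the code reaches this point, it means no suitable frame was found for any gap
--     return None
-- ===== SOURCE B (Python) =====
-- def insert_for_even_distribution(processed_frames, available_frames):
--     if len(processed_frames) == 0:
--         return available_frames[0]
--     if len(processed_frames) == 1:
--         return available_frames[len(available_frames) - 1]
--
--     processed_frames.sort()
--
--     # One forward pass over the gaps: keep the winning candidate as a running
--     # lexicographic argmax over (gap_size, -index); the best frame inside each
--     # gap is a min() over the frames that fall in it, keyed by distance to the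
--     # gap's midpoint (min keeps the first of equally close frames).
--     best = None  # (gap_size, -index, fitting frame)
--     for i in range(len(processed_frames) - 1):
--         lo = processed_frames[i]
--         hi = processed_frames[i + 1]
--         target = (lo + hi) // 2
--         fit = min((f for f in available_frames if lo < f < hi),
--                   key=lambda f: abs(f - target), default=None)
--         if fit is not None:
--             if best is None or (hi - lo, -i) > (best[0], best[1]):
--                 best = (hi - lo, -i, fit)
--     return None if best is None else best[2]
-- ===== Notes on version B (the rewrite author's own statement) =====
-- stated objective: alternative
-- what changed: B replaces A's build-then-reverse-sort of the gap list and its early-return scan with a hand-rolled inner best-fit loop by a single forward pass over the gaps that keeps a running lexicographic argmax (gap_size, -index) and computes each gap's best fit as min() over the frames inside it keyed by distance to the midpoint.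
import Mathlib
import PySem

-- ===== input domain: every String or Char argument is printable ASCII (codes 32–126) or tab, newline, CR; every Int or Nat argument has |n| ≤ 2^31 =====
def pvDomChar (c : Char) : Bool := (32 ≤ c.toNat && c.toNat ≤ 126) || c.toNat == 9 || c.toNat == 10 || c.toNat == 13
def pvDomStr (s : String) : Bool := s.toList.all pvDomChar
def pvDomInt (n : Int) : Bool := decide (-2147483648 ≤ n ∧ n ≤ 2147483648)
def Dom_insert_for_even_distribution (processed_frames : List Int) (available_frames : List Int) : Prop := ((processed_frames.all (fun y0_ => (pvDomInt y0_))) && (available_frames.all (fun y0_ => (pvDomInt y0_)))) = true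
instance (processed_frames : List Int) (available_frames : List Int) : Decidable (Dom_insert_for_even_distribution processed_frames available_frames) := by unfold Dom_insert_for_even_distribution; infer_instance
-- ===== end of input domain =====

-- B replaces A's reverse-sorted gap scan (with a hand-rolled inner best-fit loop and early
-- return) by one forward pass over the gaps keeping a running lexicographic argmax
-- (gap size, -index), with each gap's best fit computed as min-by-distance over the frames
-- inside it; equivalence is about the RETURN value only (both A and B sort
-- processed_frames in place).

-- ===== PORT A =====
-- inner 'for frame in available_frames' loop of A (best-fit scan for one gap)
def pvAInner (ps a : List Int) (start : Int) : Option Int :=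
  let lo := PySem.List.pyGetD ps start 0
  let hi := PySem.List.pyGetD ps (start + 1) 0
  let target := PySem.Int.floordiv (hi + lo) 2
  a.foldl (fun best f =>
    if lo < f ∧ f < hi then
      match best with
      | none => some f
      | some b => if |f - target| < |b - target| then some f else some b
    else best) none

-- outer 'for gap_size, start_index in gaps' loop of A (early return on the first fit)
def pvALoop (ps a : List Int) : List (Int × Int) → Option Int
  | [] => none
  | (_, i) :: rest =>
    match pvAInner ps a i with
    | some b => some b
    | none => pvALoop ps a rest

def insert_for_even_distribution (processed_frames : List Int) (available_frames : List Int) : Option Int :=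
  if processed_frames.length = 0 then PySem.List.pyGet? available_frames 0
  else if processed_frames.length = 1 then
    PySem.List.pyGet? available_frames ((available_frames.length : Int) - 1)
  else
    let ps := PySem.List.sorted processed_frames (fun x => x) false
    let gaps := (PySem.List.pyRange 0 ((ps.length : Int) - 1) 1).foldl
      (fun acc i => acc ++ [(PySem.List.pyGetD ps (i + 1) 0 - PySem.List.pyGetD ps i 0, i)]) []
    let gapsSorted := PySem.List.sorted gaps (fun x => x.1) true
    pvALoop ps available_frames gapsSorted

-- ===== PORT B =====
-- B's per-gap best fit: min((f for f in available if lo < f < hi), key=|f-target|, default=None)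
def pvFit (ps a : List Int) (i : Int) : Option Int :=
  let lo := PySem.List.pyGetD ps i 0
  let hi := PySem.List.pyGetD ps (i + 1) 0
  let target := PySem.Int.floordiv (lo + hi) 2
  PySem.List.min? (a.filter fun f => decide (lo < f ∧ f < hi)) (fun f => |f - target|)

-- one iteration of B's single pass: update the running argmax over (gap_size, -index)
def pvBStep (ps a : List Int) (best : Option (Int × Int × Int)) (i : Int) : Option (Int × Int × Int) :=
  let lo := PySem.List.pyGetD ps i 0
  let hi := PySem.List.pyGetD ps (i + 1) 0
  match pvFit ps a i with
  | none => best
  | some f =>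
    match best with
    | none => some (hi - lo, -i, f)
    | some (g0, ni0, b0) =>
      if g0 < hi - lo ∨ (g0 = hi - lo ∧ ni0 < -i) then some (hi - lo, -i, f)
      else some (g0, ni0, b0)

def insert_for_even_distribution_alt (processed_frames : List Int) (available_frames : List Int) : Option Int :=
  if processed_frames.length = 0 then PySem.List.pyGet? available_frames 0
  else if processed_frames.length = 1 then
    PySem.List.pyGet? available_frames ((available_frames.length : Int) - 1)
  else
    let ps := PySem.List.sorted processed_frames (fun x => x) false
    let best := (PySem.List.pyRange 0 ((ps.length : Int) - 1) 1).foldl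
      (pvBStep ps available_frames) none
    match best with
    | none => none
    | some (_, _, f) => some f

-- ===== PRECONDITION & SPEC =====
-- A raises IndexError exactly when processed_frames has at most one element and
-- available_frames is empty (it indexes available_frames[0] / [-1] then); Pre_ excludes
-- only those raising inputs.
def Pre_insert_for_even_distribution (processed_frames : List Int) (available_frames : List Int) : Prop :=
  processed_frames.length ≤ 1 → available_frames ≠ []
instance (processed_frames : List Int) (available_frames : List Int) : Decidable (Pre_insert_for_even_distribution processed_frames available_frames) := by unfold Pre_insert_for_even_distribution; infer_instance

def pvWitness_insert_for_even_distribution : List Int × List Int := ([3, 1, 10], [2, 6, 7])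

def Spec_insert_for_even_distribution (processed_frames : List Int) (available_frames : List Int) (out : Option Int) : Prop := out = insert_for_even_distribution_alt processed_frames available_frames
instance (processed_frames : List Int) (available_frames : List Int) (out : Option Int) : Decidable (Spec_insert_for_even_distribution processed_frames available_frames out) := by unfold Spec_insert_for_even_distribution; infer_instance

-- ===== CLAIM (what is proved, stated in full; the proofs are below) =====
def Claim_equal_insert_for_even_distribution : Prop := ∀ (processed_frames : List Int) (available_frames : List Int), Dom_insert_for_even_distribution processed_frames available_frames → Pre_insert_for_even_distribution processed_frames available_frames → Spec_insert_for_even_distribution processed_frames available_frames (insert_for_even_distribution processed_frames available_frames)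

-- ===== LEMMAS AND PROOFS =====

-- 'gi is strictly before y' in A's stable reverse sort of the gap list by gap size:
-- larger gap size, or equal size and smaller (earlier) start index.
def pvR (x y : Int × Int) : Prop := y.1 < x.1 ∨ (x.1 = y.1 ∧ x.2 < y.2)

-- A's result over a gap list characterised: the value of the pvR-least hit.
def pvGoodA (F : Int → Option Int) (o : Option Int) (hs : List (Int × Int)) : Prop :=
  (o = none ∧ hs = []) ∨ ∃ gi ∈ hs, o = F gi.2 ∧ ∀ y ∈ hs, y ≠ gi → pvR gi y

-- B's accumulator characterised the same way (also recording the stored triple's shape).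
def pvGoodB (F : Int → Option Int) (o : Option (Int × Int × Int)) (hs : List (Int × Int)) : Prop :=
  (o = none ∧ hs = []) ∨
    ∃ gi ∈ hs, ∃ f, F gi.2 = some f ∧ o = some (gi.1, -gi.2, f) ∧ ∀ y ∈ hs, y ≠ gi → pvR gi y

-- A's inner best-fit scan IS Python's min over the filtered frames.
lemma pvAInner_eq_pvFit (ps a : List Int) (i : Int) : pvAInner ps a i = pvFit ps a i := by
  simp only [pvAInner, pvFit, PySem.List.min?, List.foldl_filter]
  congr 1
  funext best f
  rw [Int.add_comm (PySem.List.pyGetD ps i 0) (PySem.List.pyGetD ps (i + 1) 0)]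
  by_cases h : PySem.List.pyGetD ps i 0 < f ∧ f < PySem.List.pyGetD ps (i + 1) 0
  · cases best <;> simp [h]
  · simp [h]

-- inserting an element that came later (larger index) into a pvR-sorted list keeps it pvR-sorted
lemma pvInsert_pairwise (x : Int × Int) :
    ∀ ys : List (Int × Int), ys.Pairwise pvR → (∀ y ∈ ys, y.2 < x.2) →
      (PySem.List.insertBy (fun a b => decide (b.1 < a.1)) x ys).Pairwise pvR := by
  intro ys
  induction ys with
  | nil => intro _ _; simp [PySem.List.insertBy]
  | cons y t ih =>
    intro hp hlt
    by_cases hxy : y.1 < x.1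
    · have : PySem.List.insertBy (fun a b => decide (b.1 < a.1)) x (y :: t) = x :: y :: t := by
        simp [PySem.List.insertBy, hxy]
      rw [this]
      refine List.Pairwise.cons ?_ hp
      intro z hz
      rcases List.mem_cons.mp hz with rfl | hzt
      · exact Or.inl hxy
      · have := (List.pairwise_cons.mp hp).1 z hzt
        rcases this with h1 | ⟨h1, _⟩
        · exact Or.inl (lt_trans h1 hxy)
        · exact Or.inl (h1 ▸ hxy)
    · have : PySem.List.insertBy (fun a b => decide (b.1 < a.1)) x (y :: t)
          = y :: PySem.List.insertBy (fun a b => decide (b.1 < a.1)) x t := by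
        simp [PySem.List.insertBy, hxy]
      rw [this]
      refine List.Pairwise.cons ?_ (ih (List.pairwise_cons.mp hp).2
        (fun z hz => hlt z (List.mem_cons_of_mem y hz)))
      intro z hz
      rcases (PySem.List.mem_insertBy _ x z t).mp hz with rfl | hzt
      · rcases lt_or_eq_of_le (le_of_not_gt hxy) with h1 | h1
        · exact Or.inl h1
        · exact Or.inr ⟨h1.symm, hlt y (List.mem_cons_self)⟩
      · exact (List.pairwise_cons.mp hp).1 z hzt

lemma pvFoldIns_pairwise :
    ∀ (l acc : List (Int × Int)), l.Pairwise (fun x y => x.2 < y.2) → acc.Pairwise pvR →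
      (∀ y ∈ acc, ∀ x ∈ l, y.2 < x.2) →
      (l.foldl (fun acc x => PySem.List.insertBy (fun a b => decide (b.1 < a.1)) x acc) acc).Pairwise pvR := by
  intro l
  induction l with
  | nil => intro acc _ ha _; simpa using ha
  | cons x t ih =>
    intro acc hl ha hlt
    have hl' := List.pairwise_cons.mp hl
    refine ih _ hl'.2 (pvInsert_pairwise x acc ha
      (fun y hy => hlt y hy x List.mem_cons_self)) ?_
    intro y hy z hz
    rcases (PySem.List.mem_insertBy _ x y acc).mp hy with rfl | hya
    · exact hl'.1 z hz
    · exact hlt y hya z (List.mem_cons_of_mem x hz)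

-- A's stable reverse sort by gap size of a list with strictly increasing indices is pvR-sorted
lemma pvSorted_pairwise (l : List (Int × Int)) (h : l.Pairwise (fun x y => x.2 < y.2)) :
    (PySem.List.sorted l (fun x => x.1) true).Pairwise pvR := by
  rw [PySem.List.sorted_rev_eq_foldl_insertBy]
  exact pvFoldIns_pairwise l [] h List.Pairwise.nil (by simp)

-- A's outer loop over any pvR-sorted gap list satisfies pvGoodA w.r.t. its list of hits.
lemma pvALoop_good (ps a : List Int) :
    ∀ l : List (Int × Int), l.Pairwise pvR →
      pvGoodA (pvFit ps a) (pvALoop ps a l) (l.filter (fun gi => (pvFit ps a gi.2).isSome)) := by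
  intro l
  induction l with
  | nil => intro _; exact Or.inl ⟨rfl, rfl⟩
  | cons x t ih =>
    intro hp
    obtain ⟨g, i⟩ := x
    have hp' := List.pairwise_cons.mp hp
    cases hfit : pvFit ps a i with
    | none =>
      have h1 : pvALoop ps a ((g, i) :: t) = pvALoop ps a t := by
        simp [pvALoop, pvAInner_eq_pvFit, hfit]
      have h2 : ((g, i) :: t).filter (fun gi => (pvFit ps a gi.2).isSome)
          = t.filter (fun gi => (pvFit ps a gi.2).isSome) := by
        simp [hfit]
      rw [h1, h2]; exact ih hp'.2
    | some b =>
      have h1 : pvALoop ps a ((g, i) :: t) = some b := by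
        simp [pvALoop, pvAInner_eq_pvFit, hfit]
      have h2 : ((g, i) :: t).filter (fun gi => (pvFit ps a gi.2).isSome)
          = (g, i) :: t.filter (fun gi => (pvFit ps a gi.2).isSome) := by
        simp [hfit]
      rw [h1, h2]
      refine Or.inr ⟨(g, i), List.mem_cons_self, by simp [hfit], ?_⟩
      intro y hy hne
      rcases List.mem_cons.mp hy with rfl | hyt
      · exact absurd rfl hne
      · exact hp'.1 y (List.mem_of_mem_filter hyt)

-- B's fold maintains pvGoodB along the pass (indices strictly increasing, gap sizes as stored).
lemma pvBFold_good (ps a : List Int) :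
    ∀ (l : List (Int × Int)) (acc : Option (Int × Int × Int)) (hs : List (Int × Int)),
      (∀ gi ∈ l, gi.1 = PySem.List.pyGetD ps (gi.2 + 1) 0 - PySem.List.pyGetD ps gi.2 0) →
      l.Pairwise (fun x y => x.2 < y.2) →
      (∀ y ∈ hs, ∀ x ∈ l, y.2 < x.2) →
      pvGoodB (pvFit ps a) acc hs →
      pvGoodB (pvFit ps a) (l.foldl (fun b gi => pvBStep ps a b gi.2) acc)
        (hs ++ l.filter (fun gi => (pvFit ps a gi.2).isSome)) := by
  intro l
  induction l with
  | nil => intro acc hs _ _ _ hg; simpa using hg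
  | cons x t ih =>
    intro acc hs hshape hp hlt hg
    have hp' := List.pairwise_cons.mp hp
    have hx : x.1 = PySem.List.pyGetD ps (x.2 + 1) 0 - PySem.List.pyGetD ps x.2 0 :=
      hshape x List.mem_cons_self
    have hshape' : ∀ gi ∈ t, gi.1 = PySem.List.pyGetD ps (gi.2 + 1) 0 - PySem.List.pyGetD ps gi.2 0 :=
      fun gi hgi => hshape gi (List.mem_cons_of_mem x hgi)
    cases hfit : pvFit ps a x.2 with
    | none =>
      have hstep : pvBStep ps a acc x.2 = acc := by simp [pvBStep, hfit]
      have hfilter : (x :: t).filter (fun gi => (pvFit ps a gi.2).isSome)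
          = t.filter (fun gi => (pvFit ps a gi.2).isSome) := by
        simp [hfit]
      rw [List.foldl_cons, hstep, hfilter]
      exact ih acc hs hshape' hp'.2
        (fun y hy z hz => hlt y hy z (List.mem_cons_of_mem x hz)) hg
    | some f =>
      have hfilter : (x :: t).filter (fun gi => (pvFit ps a gi.2).isSome)
          = x :: t.filter (fun gi => (pvFit ps a gi.2).isSome) := by
        simp [hfit]
      rw [List.foldl_cons, hfilter,
        show hs ++ x :: t.filter (fun gi => (pvFit ps a gi.2).isSome)
          = (hs ++ [x]) ++ t.filter (fun gi => (pvFit ps a gi.2).isSome) by simp]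
      have hltx : ∀ y ∈ hs, y.2 < x.2 := fun y hy => hlt y hy x List.mem_cons_self
      have hlt' : ∀ y ∈ hs ++ [x], ∀ z ∈ t, y.2 < z.2 := by
        intro y hy z hz
        rcases List.mem_append.mp hy with hy1 | hy1
        · exact hlt y hy1 z (List.mem_cons_of_mem x hz)
        · simpa [List.mem_singleton.mp hy1] using hp'.1 z hz
      refine ih _ (hs ++ [x]) hshape' hp'.2 hlt' ?_
      -- one step of B preserves the characterisation
      rcases hg with ⟨hacc, hhs⟩ | ⟨gi0, hgi0, f0, hf0, hacc, hmin⟩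
      · subst hacc; subst hhs
        have : pvBStep ps a none x.2
            = some (PySem.List.pyGetD ps (x.2 + 1) 0 - PySem.List.pyGetD ps x.2 0, -x.2, f) := by
          simp [pvBStep, hfit]
        rw [this]
        exact Or.inr ⟨x, by simp, f, hfit, by rw [← hx], by simp⟩
      · subst hacc
        have hgi0lt : gi0.2 < x.2 := hltx gi0 hgi0
        have hcond : (gi0.1 < PySem.List.pyGetD ps (x.2 + 1) 0 - PySem.List.pyGetD ps x.2 0
              ∨ (gi0.1 = PySem.List.pyGetD ps (x.2 + 1) 0 - PySem.List.pyGetD ps x.2 0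
                  ∧ -gi0.2 < -x.2)) ↔ gi0.1 < x.1 := by
          constructor
          · rintro (h | ⟨_, h⟩)
            · rw [hx]; exact h
            · omega
          · intro h; exact Or.inl (hx ▸ h)
        by_cases hc : gi0.1 < x.1
        · have hstep : pvBStep ps a (some (gi0.1, -gi0.2, f0)) x.2
              = some (PySem.List.pyGetD ps (x.2 + 1) 0 - PySem.List.pyGetD ps x.2 0, -x.2, f) := by
            simp only [pvBStep, hfit]
            rw [if_pos (hcond.mpr hc)]
          rw [hstep]
          refine Or.inr ⟨x, by simp, f, hfit, by rw [← hx], ?_⟩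
          intro y hy hne
          rcases List.mem_append.mp hy with hy1 | hy1
          · by_cases hygi : y = gi0
            · exact Or.inl (hygi ▸ hc)
            · have := hmin y hy1 hygi
              rcases this with h1 | ⟨h1, _⟩
              · exact Or.inl (lt_trans h1 hc)
              · exact Or.inl (h1 ▸ hc)
          · exact absurd (List.mem_singleton.mp hy1) hne
        · have hstep : pvBStep ps a (some (gi0.1, -gi0.2, f0)) x.2 = some (gi0.1, -gi0.2, f0) := by
            simp only [pvBStep, hfit]
            rw [if_neg (fun h => hc (hcond.mp h))]
          rw [hstep]
          refine Or.inr ⟨gi0, List.mem_append_left _ hgi0, f0, hf0, rfl, ?_⟩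
          intro y hy hne
          rcases List.mem_append.mp hy with hy1 | hy1
          · exact hmin y hy1 hne
          · rw [List.mem_singleton.mp hy1]
            rcases lt_or_eq_of_le (le_of_not_gt hc) with h1 | h1
            · exact Or.inl h1
            · exact Or.inr ⟨h1.symm, hgi0lt⟩

-- the two characterisations over permuted hit lists pin down the same answer
lemma pv_final (F : Int → Option Int) (oA : Option Int) (oB : Option (Int × Int × Int))
    (hsA hsB : List (Int × Int)) (hperm : hsA.Perm hsB)
    (hA : pvGoodA F oA hsA) (hB : pvGoodB F oB hsB) :
    oA = oB.map (fun t => t.2.2) := by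
  rcases hA with ⟨hoA, hAnil⟩ | ⟨gi, hgi, hoA, hminA⟩
  · rcases hB with ⟨hoB, _⟩ | ⟨gi', hgi', _, _, _, _⟩
    · simp [hoA, hoB]
    · exact absurd (hperm.mem_iff.mpr hgi') (by simp [hAnil])
  · rcases hB with ⟨_, hBnil⟩ | ⟨gi', hgi', f, hf, hoB, hminB⟩
    · exact absurd (hperm.mem_iff.mp hgi) (by simp [hBnil])
    · have hgieq : gi = gi' := by
        by_contra hne
        have h1 := hminA gi' (hperm.mem_iff.mpr hgi') (fun h => hne h.symm)
        have h2 := hminB gi (hperm.mem_iff.mp hgi) hne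
        unfold pvR at h1 h2; omega
      simp [hoA, hoB, hgieq, hf]

theorem insert_for_even_distribution_spec : Claim_equal_insert_for_even_distribution := by
  intro p a _ _
  unfold Spec_insert_for_even_distribution
  by_cases h0 : p.length = 0
  · simp [insert_for_even_distribution, insert_for_even_distribution_alt, h0]
  by_cases h1 : p.length = 1
  · simp [insert_for_even_distribution, insert_for_even_distribution_alt, h1]
  -- main branch
  simp only [insert_for_even_distribution, insert_for_even_distribution_alt, h0, h1, if_false]
  set ps := PySem.List.sorted p (fun x => x) false with hps
  set gapfn : Int → Int × Int :=
    (fun i => (PySem.List.pyGetD ps (i + 1) 0 - PySem.List.pyGetD ps i 0, i)) with hgapfn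
  set rng := PySem.List.pyRange 0 ((ps.length : Int) - 1) 1 with hrng
  have hgaps : rng.foldl
      (fun acc i => acc ++ [(PySem.List.pyGetD ps (i + 1) 0 - PySem.List.pyGetD ps i 0, i)]) []
      = rng.map gapfn := by
    simpa using PySem.List.foldl_append_singleton_eq_map gapfn rng []
  rw [hgaps]
  have hpairs : (rng.map gapfn).Pairwise (fun x y => x.2 < y.2) := by
    refine List.Pairwise.map (R := fun i j : Int => i < j) gapfn (fun i j h => ?_) ?_
    · simpa [hgapfn] using h
    · rw [hrng]; exact PySem.List.pairwise_lt_pyRange_one 0 _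
  have hshape : ∀ gi ∈ rng.map gapfn,
      gi.1 = PySem.List.pyGetD ps (gi.2 + 1) 0 - PySem.List.pyGetD ps gi.2 0 := by
    intro gi hgi
    rcases List.mem_map.mp hgi with ⟨i, _, rfl⟩
    simp [hgapfn]
  have hAgood := pvALoop_good ps a (PySem.List.sorted (rng.map gapfn) (fun x => x.1) true)
    (pvSorted_pairwise _ hpairs)
  have hBfold : rng.foldl (pvBStep ps a) none
      = (rng.map gapfn).foldl (fun b gi => pvBStep ps a b gi.2) none := by
    rw [List.foldl_map]
  have hBgood := pvBFold_good ps a (rng.map gapfn) none [] hshape hpairs (by simp)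
    (Or.inl ⟨rfl, rfl⟩)
  have hfin := pv_final (pvFit ps a) _ _ _ _
    ((PySem.List.sorted_perm (rng.map gapfn) (fun x => x.1) true).filter _)
    hAgood (by simpa using hBgood)
  rw [hfin, hBfold]
  cases (rng.map gapfn).foldl (fun b gi => pvBStep ps a b gi.2) none with
  | none => rfl
  | some t => obtain ⟨g, ni, f⟩ := t; rfl
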